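-- pv_equiv track=rewrite | github.com/MileyWrx/CS61A-Project-backup | typing_test/typing_test.py | swap_score
-- ===== SOURCE A (Python) =====
-- def swap_score(w1, w2):
--     """ Return the number of characters we need to substitute to change w1 to w2
--     """
--     list1, list2 = list(w1), list(w2)
--     if list1 == [] or list2 == []:
--         return 0
--     if list1[0] == list2[0]:
--         return swap_score(list1[1:], list2[1:]) + 0
--     else:
--         return swap_score(list1[1:], list2[1:]) + 1
-- ===== SOURCE B (Python) =====
-- def swap_score(w1, w2):
--     """Return the number of characters we need to substitute to change w1 to w2."""
--     count = 0
--     i = 0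
--     while i < len(w1) and i < len(w2):
--         if w1[i] != w2[i]:
--             count += 1
--         i += 1
--     return count
-- ===== Notes on version B (the rewrite author's own statement) =====
-- stated objective: faster
-- what changed: Replaces the self-recursion with per-call list() copies and slicing by a single explicit while loop over an index with a count accumulator.
import Mathlib
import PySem

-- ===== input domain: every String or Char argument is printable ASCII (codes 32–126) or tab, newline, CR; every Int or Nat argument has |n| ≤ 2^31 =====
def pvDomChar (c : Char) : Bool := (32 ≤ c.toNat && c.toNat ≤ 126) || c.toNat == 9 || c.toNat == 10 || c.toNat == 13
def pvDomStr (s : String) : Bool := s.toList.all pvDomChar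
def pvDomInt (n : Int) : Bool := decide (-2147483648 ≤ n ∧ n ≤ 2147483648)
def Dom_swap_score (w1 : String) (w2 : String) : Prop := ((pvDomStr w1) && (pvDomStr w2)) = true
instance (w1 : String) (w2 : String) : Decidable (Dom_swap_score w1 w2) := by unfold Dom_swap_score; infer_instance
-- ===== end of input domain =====

-- B replaces A's self-recursion with list copies/slices by one explicit index loop with a count accumulator.


-- ===== PORT A =====
-- A's recursion: if either list is empty return 0, else recurse on the tails
-- and add 0 or 1 depending on the head comparison.
def swapScoreRecA : List Char → List Char → Int
  | [], _ => 0
  | _, [] => 0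
  | a :: t1, b :: t2 =>
    if a = b then swapScoreRecA t1 t2 + 0 else swapScoreRecA t1 t2 + 1

def swap_score (w1 : String) (w2 : String) : Int :=
  swapScoreRecA w1.toList w2.toList

-- ===== PORT B =====
-- B's while loop: index i, accumulator count, stop when i reaches either length.
def swapScoreLoopB (l1 l2 : List Char) (i : Nat) (count : Int) : Int :=
  if h : i < l1.length ∧ i < l2.length then
    swapScoreLoopB l1 l2 (i + 1) (if l1[i]'h.1 ≠ l2[i]'h.2 then count + 1 else count)
  else count
termination_by l1.length - i

def swap_score_alt (w1 : String) (w2 : String) : Int :=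
  swapScoreLoopB w1.toList w2.toList 0 0

-- ===== PRECONDITION & SPEC =====
def Spec_swap_score (w1 : String) (w2 : String) (out : Int) : Prop := out = swap_score_alt w1 w2
instance (w1 : String) (w2 : String) (out : Int) : Decidable (Spec_swap_score w1 w2 out) := by unfold Spec_swap_score; infer_instance

-- ===== CLAIM (what is proved, stated in full; the proofs are below) =====
def Claim_equal_swap_score : Prop := ∀ (w1 : String) (w2 : String), Dom_swap_score w1 w2 → Spec_swap_score w1 w2 (swap_score w1 w2)

-- ===== LEMMAS AND PROOFS =====
theorem swapScoreRecA_nil_right (l : List Char) : swapScoreRecA l [] = 0 := by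
  cases l <;> rfl

theorem swapScoreLoopB_eq (l1 l2 : List Char) (i : Nat) (count : Int) :
    swapScoreLoopB l1 l2 i count = count + swapScoreRecA (l1.drop i) (l2.drop i) := by
  fun_induction swapScoreLoopB l1 l2 i count with
  | case1 i count h ih =>
    simp only [ne_eq, dite_eq_ite] at ih
    rw [ih, List.drop_eq_getElem_cons h.1, List.drop_eq_getElem_cons h.2,
        swapScoreRecA]
    split_ifs with hc hne <;> simp_all <;> ring
  | case2 i count h =>
    rcases Nat.lt_or_ge i l1.length with h1 | h1
    · have h2 : l2.length ≤ i := by omega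
      rw [List.drop_eq_nil_of_le h2, swapScoreRecA_nil_right]; ring
    · rw [List.drop_eq_nil_of_le h1]; simp [swapScoreRecA]

-- ===== VERDICT (by name: the statement is the Claim_ definition above) =====
theorem swap_score_spec : Claim_equal_swap_score := by
  intro w1 w2 _
  unfold Spec_swap_score swap_score swap_score_alt
  rw [swapScoreLoopB_eq]
  simp
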